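-- pv_equiv track=rewrite | github.com/yeele/aoj | atc/abc150a/abc150ad_bkup.py | sol_wrong
-- ===== SOURCE A (Python) =====
-- def sol_wrong(n):
--     if n <= 0: return 0
--     dp = [0] * (n+1)
--
--     dp[1] = 0
--     if n == 1:
--         return dp[n]
--     if n == 2:
--         return 1
--     if n == 3:
--         return 3
--     # dp[2] = 1
--     # dp[2] = 3
--     # dp[4] = 5
--
--     for i in range(3, n+1):
--         dp[i] = dp[i-2] + i
--
--     return dp[n]
-- ===== SOURCE B (Python) =====
-- def sol_wrong(n):
--     if n <= 0:
--         return 0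
--     if n == 2:
--         return 1
--     if n % 2 == 1:
--         k = (n + 1) // 2
--         return k * k - 1
--     k = n // 2
--     return k * (k + 1) - 2
-- ===== Notes on version B (the rewrite author's own statement) =====
-- stated objective: faster
-- what changed: Replaced the O(n) dp-array loop by the closed-form arithmetic-series formula for the same-parity sum (with A's hard-coded n=2 case kept).
import Mathlib
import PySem

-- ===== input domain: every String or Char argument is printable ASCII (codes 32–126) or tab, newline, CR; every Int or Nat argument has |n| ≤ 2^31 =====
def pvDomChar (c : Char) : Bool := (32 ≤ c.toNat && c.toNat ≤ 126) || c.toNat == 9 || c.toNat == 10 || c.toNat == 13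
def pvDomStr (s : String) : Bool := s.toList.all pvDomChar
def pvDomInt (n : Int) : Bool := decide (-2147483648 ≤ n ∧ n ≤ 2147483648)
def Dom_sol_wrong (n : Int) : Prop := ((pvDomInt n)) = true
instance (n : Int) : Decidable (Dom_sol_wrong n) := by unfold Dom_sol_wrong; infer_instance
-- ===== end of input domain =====

-- B replaces A's O(n) dp loop with the O(1) closed-form arithmetic-series formula (same return value everywhere).

-- ===== PORT A =====
def sol_wrong (n : Int) : Int :=
  if n ≤ 0 then 0
  else
    let dp := List.replicate (n + 1).toNat (0 : Int)
    let dp := PySem.List.pySetD dp 1 0          -- dp[1] = 0 (index 1 is in range since n ≥ 1)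
    if n = 1 then PySem.List.pyGetD dp n 0
    else if n = 2 then 1
    else if n = 3 then 3
    else
      let dp :=
        (PySem.List.pyRange 3 (n + 1) 1).foldl
          (fun dp i => PySem.List.pySetD dp i (PySem.List.pyGetD dp (i - 2) 0 + i)) dp
      PySem.List.pyGetD dp n 0                  -- dp[n], in range since 0 ≤ n < n+1

-- ===== PORT B =====
def sol_wrong_alt (n : Int) : Int :=
  if n ≤ 0 then 0
  else if n = 2 then 1
  else if PySem.Int.mod n 2 = 1 then
    let k := PySem.Int.floordiv (n + 1) 2
    k * k - 1
  else
    let k := PySem.Int.floordiv n 2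
    k * (k + 1) - 2

-- ===== PRECONDITION & SPEC =====
def Spec_sol_wrong (n : Int) (out : Int) : Prop := out = sol_wrong_alt n
instance (n : Int) (out : Int) : Decidable (Spec_sol_wrong n out) := by unfold Spec_sol_wrong; infer_instance

-- ===== CLAIM (what is proved, stated in full; the proofs are below) =====
def Claim_equal_sol_wrong : Prop := ∀ (n : Int), Dom_sol_wrong n → Spec_sol_wrong n (sol_wrong n)

-- ===== LEMMAS AND PROOFS =====

-- getD after set, in terms of getD on the original list
lemma getD_set_eq (l : List Int) (i j : Nat) (v d : Int) :
    (l.set i v).getD j d = if j = i ∧ i < l.length then v else l.getD j d := by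
  simp [List.getD_eq_getElem?_getD, List.getElem?_set]
  split_ifs with h1 h2 h3 <;> simp_all

-- B satisfies the dp recurrence for x ≥ 5
lemma alt_rec (x : Int) (hx : 5 ≤ x) : sol_wrong_alt x = sol_wrong_alt (x - 2) + x := by
  unfold sol_wrong_alt
  simp only [PySem.Int.mod_eq_emod_of_pos (show (0:Int) < 2 by norm_num),
      PySem.Int.floordiv_eq_ediv_of_pos (show (0:Int) < 2 by norm_num)]
  have h2 : (x - 2) % 2 = x % 2 := by omega
  by_cases hodd : x % 2 = 1
  · have hk : x = 2 * ((x + 1) / 2) - 1 := by omega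
    have hk2 : (x - 2 + 1) / 2 = (x + 1) / 2 - 1 := by omega
    simp only [if_neg (by omega : ¬ x ≤ 0), if_neg (by omega : ¬ x - 2 ≤ 0),
      if_neg (by omega : ¬ x = 2), if_neg (by omega : ¬ x - 2 = 2),
      h2, if_pos hodd, hk2]
    set k := (x + 1) / 2
    calc k * k - 1 = (k - 1) * (k - 1) - 1 + (2 * k - 1) := by ring
    _ = (k - 1) * (k - 1) - 1 + x := by rw [← hk]
  · have hk : x = 2 * (x / 2) := by omega
    have hk2 : (x - 2) / 2 = x / 2 - 1 := by omega
    simp only [if_neg (by omega : ¬ x ≤ 0), if_neg (by omega : ¬ x - 2 ≤ 0),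
      if_neg (by omega : ¬ x = 2), if_neg (by omega : ¬ x - 2 = 2),
      h2, if_neg hodd, hk2]
    set k := x / 2
    calc k * (k + 1) - 2 = (k - 1) * (k - 1 + 1) - 2 + 2 * k := by ring
    _ = (k - 1) * (k - 1 + 1) - 2 + x := by rw [← hk]

-- the loop body of A
def pvStep (dp : List Int) (i : Int) : List Int :=
  PySem.List.pySetD dp i (PySem.List.pyGetD dp (i - 2) 0 + i)

-- the initial dp of A for parameter value ↑N
def pvDp0 (N : Nat) : List Int := PySem.List.pySetD (List.replicate (N + 1) (0 : Int)) 1 0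

lemma dp0_len (N : Nat) : (pvDp0 N).length = N + 1 := by
  simp [pvDp0]

lemma dp0_getD (N : Nat) (j : Nat) : (pvDp0 N).getD j 0 = 0 := by
  have : PySem.List.pySetD (List.replicate (N + 1) (0 : Int)) ((1 : Nat) : Int) 0
      = (List.replicate (N + 1) (0 : Int)).set 1 0 := PySem.List.pySetD_natCast _ 1 0
  simp only [pvDp0]
  rw [show ((1 : Int)) = ((1 : Nat) : Int) by norm_num, PySem.List.pySetD_natCast,
      getD_set_eq]
  split_ifs <;> simp [List.getD_eq_getElem?_getD, List.getElem?_replicate]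
  split_ifs <;> rfl

-- invariant: after the loop has run up to m (3 ≤ m ≤ N), cell j holds
-- sol_wrong_alt j for 3 ≤ j ≤ m and 0 elsewhere, and the length is unchanged
lemma loop_inv (N : Nat) : ∀ m : Nat, 3 ≤ m → m ≤ N →
    (((PySem.List.pyRange 3 ((m : Int) + 1) 1).foldl pvStep (pvDp0 N)).length = N + 1) ∧
    (∀ j : Nat, ((PySem.List.pyRange 3 ((m : Int) + 1) 1).foldl pvStep (pvDp0 N)).getD j 0
      = if 3 ≤ j ∧ j ≤ m then sol_wrong_alt (j : Int) else 0) := by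
  intro m
  induction m with
  | zero => omega
  | succ m ih =>
    intro h3 hN
    by_cases hm : m = 2
    · -- base case m+1 = 3 : range is [3]
      subst hm
      have hr : PySem.List.pyRange 3 ((3 : Nat) + 1 : Int) 1 = [(3 : Int)] := by decide
      rw [show (((3:Nat) : Int) + 1) = ((3 : Nat) + 1 : Int) by omega, hr]
      simp only [List.foldl_cons, List.foldl_nil, pvStep]
      have hg : PySem.List.pyGetD (pvDp0 N) (3 - 2) 0 = 0 := by
        rw [show ((3 : Int) - 2) = ((1 : Nat) : Int) by norm_num,
            PySem.List.pyGetD_natCast, dp0_getD]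
      rw [hg, show ((3:Int)) = ((3 : Nat) : Int) by norm_num, PySem.List.pySetD_natCast]
      constructor
      · simp [dp0_len]
      · intro j
        rw [show ((0:Int) + ((3:Nat):Int)) = 3 by norm_num, getD_set_eq, dp0_len]
        split_ifs with h1 h2 h2
        · have : j = 3 := h1.1
          subst this
          decide
        · omega
        · omega
        · rw [dp0_getD]
    · -- inductive step: m ≥ 3, peel off the last element m+1
      have h3m : 3 ≤ m := by omega
      obtain ⟨ihl, ihg⟩ := ih h3m (by omega)
      have hr : PySem.List.pyRange 3 (((m+1 : Nat) : Int) + 1) 1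
          = PySem.List.pyRange 3 ((m : Int) + 1) 1 ++ [((m : Int) + 1)] := by
        have := PySem.List.pyRange_one_succ_right (a := 3) (b := (m : Int) + 1)
          (by exact_mod_cast by omega)
        rw [show (((m+1 : Nat) : Int) + 1) = ((m : Int) + 1) + 1 by omega]
        exact this
      rw [hr, List.foldl_append]
      set L := (PySem.List.pyRange 3 ((m : Int) + 1) 1).foldl pvStep (pvDp0 N) with hL
      simp only [List.foldl_cons, List.foldl_nil, pvStep]
      have hcast : ((m : Int) + 1 - 2) = ((m - 1 : Nat) : Int) := by omega
      have hsetm1 : ((m : Int) + 1) = ((m + 1 : Nat) : Int) := by omega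
      by_cases hm4 : m = 3
      · -- writing cell 4: dp[2] = 0, the new value is 0 + 4
        subst hm4
        have hget : PySem.List.pyGetD L ((3 : Nat) + 1 - 2 : Int) 0 = 0 := by
          rw [hcast, PySem.List.pyGetD_natCast, ihg 2, if_neg (by omega)]
        rw [hget, hsetm1, PySem.List.pySetD_natCast]
        refine ⟨by simp [ihl], fun j => ?_⟩
        rw [getD_set_eq, ihl]
        split_ifs with h1 h2 h2
        · obtain ⟨hj, _⟩ := h1; subst hj; decide
        · omega
        · rw [ihg j, if_pos (by omega)]
        · rw [ihg j, if_neg (by omega)]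
      · -- writing cell m+1 ≥ 5: dp[m-1] already holds alt (m-1); use the recurrence
        have hget : PySem.List.pyGetD L ((m : Int) + 1 - 2) 0
            = sol_wrong_alt ((m - 1 : Nat) : Int) := by
          rw [hcast, PySem.List.pyGetD_natCast, ihg (m - 1), if_pos (by omega)]
        rw [hget, hsetm1, PySem.List.pySetD_natCast]
        refine ⟨by simp [ihl], fun j => ?_⟩
        rw [getD_set_eq, ihl]
        split_ifs with h1 h2 h2
        · obtain ⟨hj, _⟩ := h1; subst hj
          have hrec := alt_rec ((m + 1 : Nat) : Int) (by exact_mod_cast by omega)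
          rw [hrec, show (((m + 1 : Nat) : Int) - 2) = ((m - 1 : Nat) : Int) by omega]
        · omega
        · rw [ihg j, if_pos (by omega)]
        · rw [ihg j, if_neg (by omega)]

-- ===== VERDICT (by name: the statement is the Claim_ definition above) =====
theorem sol_wrong_spec : Claim_equal_sol_wrong := by
  intro n _
  show sol_wrong n = sol_wrong_alt n
  by_cases h0 : n ≤ 0
  · simp [sol_wrong, sol_wrong_alt, h0]
  · by_cases h1 : n = 1
    · subst h1; decide
    · by_cases h2 : n = 2
      · subst h2; decide
      · by_cases h3 : n = 3
        · subst h3; decide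
        · -- n ≥ 4
          have h4 : 4 ≤ n := by omega
          set N := n.toNat with hNdef
          have hn : n = (N : Int) := by omega
          have hN4 : 4 ≤ N := by omega
          unfold sol_wrong
          rw [if_neg h0, if_neg h1, if_neg h2, if_neg h3]
          have hlen : (n + 1).toNat = N + 1 := by omega
          obtain ⟨_, hg⟩ := loop_inv N N (by omega) (le_refl N)
          have hfold :
              (PySem.List.pyRange 3 (n + 1) 1).foldl
                (fun dp i => PySem.List.pySetD dp i (PySem.List.pyGetD dp (i - 2) 0 + i))
                (PySem.List.pySetD (List.replicate (n + 1).toNat (0 : Int)) 1 0)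
              = (PySem.List.pyRange 3 ((N : Int) + 1) 1).foldl pvStep (pvDp0 N) := by
            rw [hlen, hn]; rfl
          rw [hfold, hn, PySem.List.pyGetD_natCast, hg N]
          rw [if_pos (by omega)]
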